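-- pv_equiv track=rewrite | github.com/tu8435/pokeagent-speedrun | save_maps_for_review.py | format_map_for_review
-- ===== SOURCE A (Python) =====
-- def format_map_for_review(tiles, title, location, position):
--     """Format map tiles for easy review"""
--     if not tiles:
--         return f"=== {title} ===\nNo tiles available\n"
--
--     output = []
--     output.append(f"=== {title} ===")
--     output.append(f"Format: (MetatileID, Behavior, X, Y)")
--     output.append(f"Map dimensions: {len(tiles)}x{len(tiles[0]) if tiles else 0}")
--     output.append(f"Player position: {position}")
--     output.append(f"Location: {location}")
--     output.append("")
--     output.append("--- TRAVERSABILITY MAP ---")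
--
--     # Header with column numbers
--     header = "      " + "  ".join(f"{i:2}" for i in range(len(tiles[0]) if tiles else 0))
--     output.append(header)
--     output.append("    " + "-" * (len(header) - 4))
--
--     # Map rows with behavior analysis
--     corruption_count = 0
--     door_count = 0
--     wall_count = 0
--
--     for row_idx, row in enumerate(tiles):
--         traversability_row = []
--         for col_idx, tile in enumerate(row):
--             if len(tile) >= 4:
--                 tile_id, behavior, collision, elevation = tile
--                 behavior_val = behavior if not hasattr(behavior, 'value') else behavior.value
--
--                 # Convert to traversability symbol with collision detection
--                 if behavior_val == 0:  # NORMAL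
--                     if collision == 0:
--                         symbol = "."
--                     else:
--                         symbol = "#"
--                         wall_count += 1
--                 elif behavior_val == 1:  # SECRET_BASE_WALL
--                     symbol = "#"
--                     wall_count += 1
--                 elif behavior_val == 51:  # IMPASSABLE_SOUTH
--                     symbol = "IM"
--                     corruption_count += 1
--                 elif behavior_val == 96:  # NON_ANIMATED_DOOR
--                     symbol = "D"
--                     door_count += 1
--                 elif behavior_val == 101:  # SOUTH_ARROW_WARP
--                     symbol = "SO"
--                 elif behavior_val == 105:  # ANIMATED_DOOR
--                     symbol = "D"
--                     door_count += 1
--                 elif behavior_val == 134:  # TELEVISION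
--                     symbol = "TE"
--                 else:
--                     symbol = "."  # Default to walkable for other behaviors
--
--                 # Mark player position (center of 15x15 map is 7,7)
--                 if row_idx == 7 and col_idx == 7:
--                     symbol = "P"
--
--                 traversability_row.append(symbol)
--             else:
--                 traversability_row.append("?")
--
--         # Format row with row number
--         row_str = f"{row_idx:2}: " + " ".join(f"{symbol:>2}" for symbol in traversability_row)
--         output.append(row_str)
--
--     # Add summary statistics
--     output.append("")
--     output.append("--- SUMMARY ---")
--     output.append(f"Total tiles: {len(tiles) * len(tiles[0]) if tiles else 0}")
--     output.append(f"Corruption (IM): {corruption_count}")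
--     output.append(f"Doors (D): {door_count}")
--     output.append(f"Walls (#): {wall_count}")
--     output.append(f"Walkable (.): {len(tiles) * len(tiles[0]) - corruption_count - door_count - wall_count if tiles else 0}")
--
--     if corruption_count > 0:
--         output.append("")
--         output.append("--- CORRUPTION DETAILS ---")
--         for row_idx, row in enumerate(tiles):
--             for col_idx, tile in enumerate(row):
--                 if len(tile) >= 2:
--                     behavior = tile[1] if not hasattr(tile[1], 'value') else tile[1].value
--                     if behavior == 134:
--                         output.append(f"Corruption at ({row_idx}, {col_idx}): tile_id={tile[0]}, behavior={behavior}")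
--
--     return "\n".join(output)
-- ===== SOURCE B (Python) =====
-- def format_map_for_review(tiles, title, location, position):
--     """Single-pass rewrite: counters computed from behavior predicates (not the symbol
--     ladder) and corruption-detail lines collected inline, eliminating A's second grid scan."""
--     if not tiles:
--         return f"=== {title} ===\nNo tiles available\n"
--     ncols = len(tiles[0])
--     SYM = {1: "#", 51: "IM", 96: "D", 101: "SO", 105: "D", 134: "TE"}
--     body = []
--     details = []
--     corruption = doors = walls = 0
--     for r, row in enumerate(tiles):
--         cells = []
--         for c, tile in enumerate(row):
--             b, col = tile[1], tile[2]
--             corruption += b == 51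
--             doors += b == 96 or b == 105
--             walls += b == 1 or (b == 0 and col != 0)
--             if b == 134:
--                 details.append(f"Corruption at ({r}, {c}): tile_id={tile[0]}, behavior={b}")
--             sym = "P" if (r, c) == (7, 7) else (("." if col == 0 else "#") if b == 0 else SYM.get(b, "."))
--             cells.append(f"{sym:>2}")
--         body.append(f"{r:2}: " + " ".join(cells))
--     header = "      " + "  ".join(f"{i:2}" for i in range(ncols))
--     total = len(tiles) * ncols
--     out = [
--         f"=== {title} ===",
--         "Format: (MetatileID, Behavior, X, Y)",
--         f"Map dimensions: {len(tiles)}x{ncols}",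
--         f"Player position: {position}",
--         f"Location: {location}",
--         "",
--         "--- TRAVERSABILITY MAP ---",
--         header,
--         "    " + "-" * (len(header) - 4),
--         *body,
--         "",
--         "--- SUMMARY ---",
--         f"Total tiles: {total}",
--         f"Corruption (IM): {corruption}",
--         f"Doors (D): {doors}",
--         f"Walls (#): {walls}",
--         f"Walkable (.): {total - corruption - doors - walls}",
--     ]
--     if corruption > 0:
--         out.append("")
--         out.append("--- CORRUPTION DETAILS ---")
--         out.extend(details)
--     return "\n".join(out)
-- ===== Notes on version B (the rewrite author's own statement) =====
-- stated objective: alternative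
-- what changed: B makes a single pass over the grid: the wall/door/corruption counters are computed from behavior/collision predicates (not by incrementing inside the symbol if/elif ladder), the symbol comes from a dict table, and the corruption-detail lines are collected inline in the same loop, eliminating A's second full grid scan.
import Mathlib
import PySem

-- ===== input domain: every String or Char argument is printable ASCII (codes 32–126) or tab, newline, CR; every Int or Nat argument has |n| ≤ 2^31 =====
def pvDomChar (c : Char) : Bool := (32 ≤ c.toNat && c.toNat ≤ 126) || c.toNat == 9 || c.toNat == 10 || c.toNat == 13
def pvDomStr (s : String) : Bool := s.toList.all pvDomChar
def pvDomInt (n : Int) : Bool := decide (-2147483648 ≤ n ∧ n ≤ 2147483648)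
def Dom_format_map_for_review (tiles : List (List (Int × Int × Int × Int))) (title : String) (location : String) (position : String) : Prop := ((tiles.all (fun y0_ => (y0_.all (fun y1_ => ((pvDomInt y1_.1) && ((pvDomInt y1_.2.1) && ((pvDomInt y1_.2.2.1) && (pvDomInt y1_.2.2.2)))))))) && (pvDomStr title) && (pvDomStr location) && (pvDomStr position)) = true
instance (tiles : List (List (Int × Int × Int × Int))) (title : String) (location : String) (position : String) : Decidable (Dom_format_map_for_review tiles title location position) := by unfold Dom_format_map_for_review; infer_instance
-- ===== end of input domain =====

-- B does a single pass over the grid: counters come from behavior/collision predicates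
-- (not from the symbol if/elif ladder), the symbol from a dict table, and the
-- corruption-detail lines are collected inline, removing A's second full grid scan
-- (objective: alternative).

-- shared formatting helpers (Python f"{x:2}" / f"{x:>2}": right-justify to width 2)
def pvRj2 (s : String) : String :=
  String.mk (List.replicate (2 - s.toList.length) ' ' ++ s.toList)

-- f"Corruption at ({r}, {c}): tile_id={t[0]}, behavior={t[1]}"
def pvDetail (ri ci : Int) (t : Int × Int × Int × Int) : String :=
  "Corruption at (" ++ PySem.Int.toStr ri ++ ", " ++ PySem.Int.toStr ci ++ "): tile_id=" ++
    PySem.Int.toStr t.1 ++ ", behavior=" ++ PySem.Int.toStr t.2.1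

-- ===== PORT A =====
-- A's inner-loop body: the if/elif ladder over (behavior, collision) updating
-- (traversability_row, corruption_count, door_count, wall_count), then the (7,7) override.
-- The Lean tile type is a 4-tuple, so Python's "len(tile) >= 4" guard is identically true
-- and "hasattr(behavior, 'value')" is identically false; both are dropped.
def pvAStep (ri ci : Int) (tile : Int × Int × Int × Int)
    (acc : List String × Int × Int × Int) : List String × Int × Int × Int :=
  let r :=
    if tile.2.1 = 0 then
      if tile.2.2.1 = 0 then ((".", acc.2.1, acc.2.2.1, acc.2.2.2) : String × Int × Int × Int)
      else ("#", acc.2.1, acc.2.2.1, acc.2.2.2 + 1)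
    else if tile.2.1 = 1 then ("#", acc.2.1, acc.2.2.1, acc.2.2.2 + 1)
    else if tile.2.1 = 51 then ("IM", acc.2.1 + 1, acc.2.2.1, acc.2.2.2)
    else if tile.2.1 = 96 then ("D", acc.2.1, acc.2.2.1 + 1, acc.2.2.2)
    else if tile.2.1 = 101 then ("SO", acc.2.1, acc.2.2.1, acc.2.2.2)
    else if tile.2.1 = 105 then ("D", acc.2.1, acc.2.2.1 + 1, acc.2.2.2)
    else if tile.2.1 = 134 then ("TE", acc.2.1, acc.2.2.1, acc.2.2.2)
    else (".", acc.2.1, acc.2.2.1, acc.2.2.2)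
  let symbol := if ri = 7 ∧ ci = 7 then "P" else r.1
  (acc.1 ++ [symbol], r.2.1, r.2.2.1, r.2.2.2)

def format_map_for_review (tiles : List (List (Int × Int × Int × Int))) (title : String) (location : String) (position : String) : String :=
  if tiles = [] then "=== " ++ title ++ " ===\nNo tiles available\n"
  else
    let ncols : Int := PySem.List.len (tiles.headD [])
    let output : List String :=
      ["=== " ++ title ++ " ===",
       "Format: (MetatileID, Behavior, X, Y)",
       "Map dimensions: " ++ PySem.Int.toStr (PySem.List.len tiles) ++ "x" ++ PySem.Int.toStr ncols,
       "Player position: " ++ position,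
       "Location: " ++ location,
       "",
       "--- TRAVERSABILITY MAP ---"]
    let header := "      " ++ PySem.Str.join "  "
      ((PySem.List.pyRange 0 ncols 1).map (fun i => pvRj2 (PySem.Int.toStr i)))
    let output := output ++ [header, "    " ++ String.mk (List.replicate ((PySem.Str.len header - 4).toNat) '-')]
    -- main loop: state = (output, corruption_count, door_count, wall_count)
    let st :=
      (PySem.List.enumerate tiles 0).foldl
        (fun (st : List String × Int × Int × Int) rp =>
          let inner :=
            (PySem.List.enumerate rp.2 0).foldl
              (fun acc cp => pvAStep rp.1 cp.1 cp.2 acc)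
              (([] : List String), st.2.1, st.2.2.1, st.2.2.2)
          (st.1 ++ [pvRj2 (PySem.Int.toStr rp.1) ++ ": " ++ PySem.Str.join " " (inner.1.map pvRj2)],
           inner.2.1, inner.2.2.1, inner.2.2.2))
        (output, 0, 0, 0)
    let output := st.1 ++
      ["", "--- SUMMARY ---",
       "Total tiles: " ++ PySem.Int.toStr (PySem.List.len tiles * ncols),
       "Corruption (IM): " ++ PySem.Int.toStr st.2.1,
       "Doors (D): " ++ PySem.Int.toStr st.2.2.1,
       "Walls (#): " ++ PySem.Int.toStr st.2.2.2,
       "Walkable (.): " ++ PySem.Int.toStr (PySem.List.len tiles * ncols - st.2.1 - st.2.2.1 - st.2.2.2)]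
    -- corruption-details second scan (Python's "len(tile) >= 2" guard is identically true here)
    let output :=
      if st.2.1 > 0 then
        (PySem.List.enumerate tiles 0).foldl
          (fun out rp =>
            (PySem.List.enumerate rp.2 0).foldl
              (fun out cp => if cp.2.2.1 = 134 then out ++ [pvDetail rp.1 cp.1 cp.2] else out)
              out)
          (output ++ ["", "--- CORRUPTION DETAILS ---"])
      else output
    PySem.Str.join "\n" output

-- ===== PORT B =====
-- Source B's symbol expression: ("." if col == 0 else "#") if b == 0 else SYM.get(b, ".")
def pvSym (tile : Int × Int × Int × Int) : String :=
  if tile.2.1 = 0 then (if tile.2.2.1 = 0 then "." else "#")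
  else PySem.Dict.getD
    (PySem.Dict.ofList [((1 : Int), "#"), (51, "IM"), (96, "D"), (101, "SO"), (105, "D"), (134, "TE")])
    tile.2.1 "."

def format_map_for_review_alt (tiles : List (List (Int × Int × Int × Int))) (title : String) (location : String) (position : String) : String :=
  if tiles = [] then "=== " ++ title ++ " ===\nNo tiles available\n"
  else
    let ncols : Int := PySem.List.len (tiles.headD [])
    -- single pass: state = (body, details, corruption, doors, walls)
    let st :=
      (PySem.List.enumerate tiles 0).foldl
        (fun (st : List String × List String × Int × Int × Int) rp =>
          let inner :=
            (PySem.List.enumerate rp.2 0).foldl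
              (fun (acc : List String × List String × Int × Int × Int) cp =>
                let b := cp.2.2.1
                let cor := acc.2.2.1 + (if b = 51 then 1 else 0)
                let dor := acc.2.2.2.1 + (if b = 96 ∨ b = 105 then 1 else 0)
                let wal := acc.2.2.2.2 + (if b = 1 ∨ (b = 0 ∧ cp.2.2.2.1 ≠ 0) then 1 else 0)
                let det := if b = 134 then acc.2.1 ++ [pvDetail rp.1 cp.1 cp.2] else acc.2.1
                let sym := if rp.1 = 7 ∧ cp.1 = 7 then "P" else pvSym cp.2
                (acc.1 ++ [pvRj2 sym], det, cor, dor, wal))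
              (([] : List String), st.2.1, st.2.2.1, st.2.2.2.1, st.2.2.2.2)
          (st.1 ++ [pvRj2 (PySem.Int.toStr rp.1) ++ ": " ++ PySem.Str.join " " inner.1],
           inner.2.1, inner.2.2.1, inner.2.2.2.1, inner.2.2.2.2))
        (([] : List String), ([] : List String), 0, 0, 0)
    let header := "      " ++ PySem.Str.join "  "
      ((PySem.List.pyRange 0 ncols 1).map (fun i => pvRj2 (PySem.Int.toStr i)))
    let total : Int := PySem.List.len tiles * ncols
    let out : List String :=
      ["=== " ++ title ++ " ===",
       "Format: (MetatileID, Behavior, X, Y)",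
       "Map dimensions: " ++ PySem.Int.toStr (PySem.List.len tiles) ++ "x" ++ PySem.Int.toStr ncols,
       "Player position: " ++ position,
       "Location: " ++ location,
       "",
       "--- TRAVERSABILITY MAP ---",
       header,
       "    " ++ String.mk (List.replicate ((PySem.Str.len header - 4).toNat) '-')]
      ++ st.1 ++
      ["", "--- SUMMARY ---",
       "Total tiles: " ++ PySem.Int.toStr total,
       "Corruption (IM): " ++ PySem.Int.toStr st.2.2.1,
       "Doors (D): " ++ PySem.Int.toStr st.2.2.2.1,
       "Walls (#): " ++ PySem.Int.toStr st.2.2.2.2,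
       "Walkable (.): " ++ PySem.Int.toStr (total - st.2.2.1 - st.2.2.2.1 - st.2.2.2.2)]
    let out :=
      if st.2.2.1 > 0 then out ++ ["", "--- CORRUPTION DETAILS ---"] ++ st.2.1
      else out
    PySem.Str.join "\n" out

-- ===== PRECONDITION & SPEC =====
def Spec_format_map_for_review (tiles : List (List (Int × Int × Int × Int))) (title : String) (location : String) (position : String) (out : String) : Prop := out = format_map_for_review_alt tiles title location position
instance (tiles : List (List (Int × Int × Int × Int))) (title : String) (location : String) (position : String) (out : String) : Decidable (Spec_format_map_for_review tiles title location position out) := by unfold Spec_format_map_for_review; infer_instance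

-- ===== CLAIM (what is proved, stated in full; the proofs are below) =====
def Claim_equal_format_map_for_review : Prop := ∀ (tiles : List (List (Int × Int × Int × Int))) (title : String) (location : String) (position : String), Dom_format_map_for_review tiles title location position → Spec_format_map_for_review tiles title location position (format_map_for_review tiles title location position)

-- ===== LEMMAS AND PROOFS =====

-- per-tile counter indicators (the canonical form both loops are reduced to)
def pvCor (t : Int × Int × Int × Int) : Int := if t.2.1 = 51 then 1 else 0
def pvDor (t : Int × Int × Int × Int) : Int := if t.2.1 = 96 ∨ t.2.1 = 105 then 1 else 0
def pvWal (t : Int × Int × Int × Int) : Int := if t.2.1 = 1 ∨ (t.2.1 = 0 ∧ t.2.2.1 ≠ 0) then 1 else 0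

def pvRowDetails (ri : Int) (row : List (Int × Int × Int × Int)) : List String :=
  (PySem.List.enumerate row 0).flatMap
    (fun cp => if cp.2.2.1 = 134 then [pvDetail ri cp.1 cp.2] else [])

-- the SYM.get default case of pvSym
theorem pvSym_default (tid b c e : Int) (h1 : ¬ b = 0) (h2 : ¬ b = 1) (h3 : ¬ b = 51)
    (h4 : ¬ b = 96) (h5 : ¬ b = 101) (h6 : ¬ b = 105) (h7 : ¬ b = 134) :
    pvSym (tid, b, c, e) = "." := by
  have hstep : pvSym (tid, b, c, e) = PySem.Dict.getD
      (PySem.Dict.ofList [((1 : Int), "#"), (51, "IM"), (96, "D"), (101, "SO"), (105, "D"), (134, "TE")])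
      b "." := by simp [pvSym, h1]
  have hd : PySem.Dict.ofList [((1 : Int), "#"), (51, "IM"), (96, "D"), (101, "SO"), (105, "D"), (134, "TE")]
      = PySem.Dict.mk [((1 : Int), "#"), (51, "IM"), (96, "D"), (101, "SO"), (105, "D"), (134, "TE")] := by decide
  rw [hstep, hd, PySem.Dict.getD_eq_get?_getD]
  simp only [PySem.Dict.get?_mk_cons, beq_iff_eq]
  rw [if_neg (fun h => h2 h.symm), if_neg (fun h => h3 h.symm), if_neg (fun h => h4 h.symm),
      if_neg (fun h => h5 h.symm), if_neg (fun h => h6 h.symm), if_neg (fun h => h7 h.symm)]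
  rfl

-- A's ladder step produces B's table symbol, and its counter increments are exactly
-- the behavior-predicate indicators
theorem pvAStep_eq (ri ci : Int) (t : Int × Int × Int × Int) (trow : List String) (cc dc wc : Int) :
    pvAStep ri ci t (trow, cc, dc, wc) =
      (trow ++ [if ri = 7 ∧ ci = 7 then "P" else pvSym t],
       cc + pvCor t, dc + pvDor t, wc + pvWal t) := by
  obtain ⟨tid, b, c, e⟩ := t
  by_cases h0 : b = 0
  · subst h0
    by_cases hc : c = 0 <;> simp [pvAStep, pvSym, pvCor, pvDor, pvWal, hc]
  · by_cases h1' : b = 1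
    · subst h1'
      have hcl : pvSym (tid, 1, c, e) = "#" := by norm_num [pvSym]; decide
      simp [pvAStep, hcl, h0, pvCor, pvDor, pvWal]
    by_cases h2 : b = 51
    · subst h2
      have hcl : pvSym (tid, 51, c, e) = "IM" := by norm_num [pvSym]; decide
      simp [pvAStep, hcl, h0, h1', pvCor, pvDor, pvWal]
    by_cases h3 : b = 96
    · subst h3
      have hcl : pvSym (tid, 96, c, e) = "D" := by norm_num [pvSym]; decide
      simp [pvAStep, hcl, h0, h1', h2, pvCor, pvDor, pvWal]
    by_cases h4 : b = 101
    · subst h4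
      have hcl : pvSym (tid, 101, c, e) = "SO" := by norm_num [pvSym]; decide
      simp [pvAStep, hcl, h0, h1', h2, h3, pvCor, pvDor, pvWal]
    by_cases h5 : b = 105
    · subst h5
      have hcl : pvSym (tid, 105, c, e) = "D" := by norm_num [pvSym]; decide
      simp [pvAStep, hcl, h0, h1', h2, h3, h4, pvCor, pvDor, pvWal]
    by_cases h6 : b = 134
    · subst h6
      have hcl : pvSym (tid, 134, c, e) = "TE" := by norm_num [pvSym]; decide
      simp [pvAStep, hcl, h0, h1', h2, h3, h4, pvCor, pvDor, pvWal]
    · have hcl := pvSym_default tid b c e h0 h1' h2 h3 h4 h5 h6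
      simp [pvAStep, hcl, h0, h1', h2, h3, h4, h5, h6, pvCor, pvDor, pvWal]

-- A's inner row loop in canonical form
theorem pv_innerA_eq (row : List (Int × Int × Int × Int)) (ri s : Int)
    (trow : List String) (cc dc wc : Int) :
    (PySem.List.enumerate row s).foldl (fun acc cp => pvAStep ri cp.1 cp.2 acc) (trow, cc, dc, wc) =
      (trow ++ (PySem.List.enumerate row s).map
          (fun cp => if ri = 7 ∧ cp.1 = 7 then "P" else pvSym cp.2),
       cc + (row.map pvCor).sum, dc + (row.map pvDor).sum, wc + (row.map pvWal).sum) := by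
  induction row generalizing s trow cc dc wc with
  | nil => simp [PySem.List.enumerate]
  | cons t rest ih =>
    rw [PySem.List.enumerate_cons]
    simp only [List.foldl_cons, List.map_cons, List.sum_cons]
    rw [pvAStep_eq, ih]
    refine Prod.ext ?_ (Prod.ext ?_ (Prod.ext ?_ ?_)) <;> simp <;> ring

-- A's main loop in canonical form
theorem pv_outerA_eq (ts : List (List (Int × Int × Int × Int))) (s : Int)
    (out : List String) (cc dc wc : Int) :
    (PySem.List.enumerate ts s).foldl
      (fun (st : List String × Int × Int × Int) rp =>
        let inner :=
          (PySem.List.enumerate rp.2 0).foldl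
            (fun acc cp => pvAStep rp.1 cp.1 cp.2 acc)
            (([] : List String), st.2.1, st.2.2.1, st.2.2.2)
        (st.1 ++ [pvRj2 (PySem.Int.toStr rp.1) ++ ": " ++ PySem.Str.join " " (inner.1.map pvRj2)],
         inner.2.1, inner.2.2.1, inner.2.2.2))
      (out, cc, dc, wc) =
      (out ++ (PySem.List.enumerate ts s).map (fun rp =>
          pvRj2 (PySem.Int.toStr rp.1) ++ ": " ++ PySem.Str.join " "
            ((PySem.List.enumerate rp.2 0).map
              (fun cp => pvRj2 (if rp.1 = 7 ∧ cp.1 = 7 then "P" else pvSym cp.2)))),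
       cc + (ts.map (fun r => (r.map pvCor).sum)).sum,
       dc + (ts.map (fun r => (r.map pvDor).sum)).sum,
       wc + (ts.map (fun r => (r.map pvWal).sum)).sum) := by
  induction ts generalizing s out cc dc wc with
  | nil => simp [PySem.List.enumerate]
  | cons row rest ih =>
    rw [PySem.List.enumerate_cons]
    simp only [List.foldl_cons, List.map_cons, List.sum_cons]
    rw [pv_innerA_eq]
    simp only []
    rw [ih]
    refine Prod.ext ?_ (Prod.ext ?_ (Prod.ext ?_ ?_)) <;>
      simp [List.map_map, Function.comp_def] <;> ring

-- B's inner row loop in canonical form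
theorem pv_innerB_eq (row : List (Int × Int × Int × Int)) (ri s : Int)
    (cells det : List String) (cc dc wc : Int) :
    (PySem.List.enumerate row s).foldl
      (fun (acc : List String × List String × Int × Int × Int) cp =>
        let b := cp.2.2.1
        let cor := acc.2.2.1 + (if b = 51 then 1 else 0)
        let dor := acc.2.2.2.1 + (if b = 96 ∨ b = 105 then 1 else 0)
        let wal := acc.2.2.2.2 + (if b = 1 ∨ (b = 0 ∧ cp.2.2.2.1 ≠ 0) then 1 else 0)
        let d := if b = 134 then acc.2.1 ++ [pvDetail ri cp.1 cp.2] else acc.2.1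
        let sym := if ri = 7 ∧ cp.1 = 7 then "P" else pvSym cp.2
        (acc.1 ++ [pvRj2 sym], d, cor, dor, wal))
      (cells, det, cc, dc, wc) =
      (cells ++ (PySem.List.enumerate row s).map
          (fun cp => pvRj2 (if ri = 7 ∧ cp.1 = 7 then "P" else pvSym cp.2)),
       det ++ (PySem.List.enumerate row s).flatMap
          (fun cp => if cp.2.2.1 = 134 then [pvDetail ri cp.1 cp.2] else []),
       cc + (row.map pvCor).sum, dc + (row.map pvDor).sum, wc + (row.map pvWal).sum) := by
  induction row generalizing s cells det cc dc wc with
  | nil => simp [PySem.List.enumerate]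
  | cons t rest ih =>
    rw [PySem.List.enumerate_cons]
    simp only [List.foldl_cons, List.map_cons, List.sum_cons, List.flatMap_cons]
    rw [ih]
    refine Prod.ext ?_ (Prod.ext ?_ (Prod.ext ?_ (Prod.ext ?_ ?_))) <;>
      · simp only [pvCor, pvDor, pvWal]
        split_ifs <;> (try simp) <;> (try ring)

-- B's main loop in canonical form
theorem pv_outerB_eq (ts : List (List (Int × Int × Int × Int))) (s : Int)
    (body det : List String) (cc dc wc : Int) :
    (PySem.List.enumerate ts s).foldl
      (fun (st : List String × List String × Int × Int × Int) rp =>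
        let inner :=
          (PySem.List.enumerate rp.2 0).foldl
            (fun (acc : List String × List String × Int × Int × Int) cp =>
              let b := cp.2.2.1
              let cor := acc.2.2.1 + (if b = 51 then 1 else 0)
              let dor := acc.2.2.2.1 + (if b = 96 ∨ b = 105 then 1 else 0)
              let wal := acc.2.2.2.2 + (if b = 1 ∨ (b = 0 ∧ cp.2.2.2.1 ≠ 0) then 1 else 0)
              let d := if b = 134 then acc.2.1 ++ [pvDetail rp.1 cp.1 cp.2] else acc.2.1
              let sym := if rp.1 = 7 ∧ cp.1 = 7 then "P" else pvSym cp.2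
              (acc.1 ++ [pvRj2 sym], d, cor, dor, wal))
            (([] : List String), st.2.1, st.2.2.1, st.2.2.2.1, st.2.2.2.2)
        (st.1 ++ [pvRj2 (PySem.Int.toStr rp.1) ++ ": " ++ PySem.Str.join " " inner.1],
         inner.2.1, inner.2.2.1, inner.2.2.2.1, inner.2.2.2.2))
      (body, det, cc, dc, wc) =
      (body ++ (PySem.List.enumerate ts s).map (fun rp =>
          pvRj2 (PySem.Int.toStr rp.1) ++ ": " ++ PySem.Str.join " "
            ((PySem.List.enumerate rp.2 0).map
              (fun cp => pvRj2 (if rp.1 = 7 ∧ cp.1 = 7 then "P" else pvSym cp.2)))),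
       det ++ (PySem.List.enumerate ts s).flatMap (fun rp => pvRowDetails rp.1 rp.2),
       cc + (ts.map (fun r => (r.map pvCor).sum)).sum,
       dc + (ts.map (fun r => (r.map pvDor).sum)).sum,
       wc + (ts.map (fun r => (r.map pvWal).sum)).sum) := by
  induction ts generalizing s body det cc dc wc with
  | nil => simp [PySem.List.enumerate]
  | cons row rest ih =>
    rw [PySem.List.enumerate_cons]
    simp only [List.foldl_cons, List.map_cons, List.sum_cons, List.flatMap_cons]
    rw [pv_innerB_eq]
    simp only []
    rw [ih]
    refine Prod.ext ?_ (Prod.ext ?_ (Prod.ext ?_ (Prod.ext ?_ ?_))) <;>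
      simp [pvRowDetails, List.map_map, Function.comp_def] <;> ring

theorem pv_flatMap_ite {a b : Type} (p : a -> Prop) [DecidablePred p] (f : a -> b) (l : List a) :
    l.flatMap (fun x => if p x then [f x] else []) =
      (l.filter (fun x => decide (p x))).map f := by
  induction l with
  | nil => rfl
  | cons x xs ih =>
    by_cases h : p x <;> simp [List.flatMap_cons, h, ih]

-- A's second scan equals the inline-collected detail lines
theorem pv_detailsA_eq (ts : List (List (Int × Int × Int × Int))) (s : Int) (out : List String) :
    (PySem.List.enumerate ts s).foldl
      (fun out rp =>
        (PySem.List.enumerate rp.2 0).foldl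
          (fun out cp => if cp.2.2.1 = 134 then out ++ [pvDetail rp.1 cp.1 cp.2] else out)
          out)
      out =
      out ++ (PySem.List.enumerate ts s).flatMap (fun rp => pvRowDetails rp.1 rp.2) := by
  induction ts generalizing s out with
  | nil => simp [PySem.List.enumerate]
  | cons row rest ih =>
    rw [PySem.List.enumerate_cons]
    simp only [List.foldl_cons, List.flatMap_cons]
    rw [PySem.List.foldl_append_ite, ih, pvRowDetails, List.append_assoc, pv_flatMap_ite]

-- ===== VERDICT (by name: the statement is the Claim_ definition above) =====
theorem format_map_for_review_spec : Claim_equal_format_map_for_review := by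
  intro tiles title location position _
  unfold Spec_format_map_for_review format_map_for_review format_map_for_review_alt
  by_cases h : tiles = []
  · simp [h]
  · simp only [if_neg h]
    rw [pv_outerA_eq, pv_outerB_eq, pv_detailsA_eq]
    simp [List.append_assoc]
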